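-- pv_equiv track=rewrite | github.com/BK-Yoo/algospot | hackerrank/python/matrix_layer_rotation/answer.py | divide_edge
-- ===== SOURCE A (Python) =====
-- def divide_edge(start, h, w):
--     edge = [start]
--     for i in range(1, h):
--         edge.append((start[0] + i, start[1]))
--     left_end = edge[-1]
--     for i in range(1, w):
--         edge.append((left_end[0], left_end[1] + i))
--     edge_end = edge[-1]
--     for i in range(1, h):
--         edge.append((edge_end[0] - i, edge_end[1]))
--     right_end = edge[-1]
--     for i in range(1, w - 1):
--         edge.append((right_end[0], right_end[1] - i))
--     return edge
-- ===== SOURCE B (Python) =====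
-- def divide_edge(start, h, w):
--     # Closed form: map the perimeter index t directly to its coordinate, no
--     # list state or running position; clamped segment lengths a,b,d handle
--     # degenerate h or w exactly as empty ranges do in A.
--     r, c = start
--     a = max(h - 1, 0)
--     b = max(w - 1, 0)
--     d = max(w - 2, 0)
--
--     def pos(t):
--         if t <= a:
--             return (r + t, c)
--         if t <= a + b:
--             return (r + a, c + (t - a))
--         if t <= 2 * a + b:
--             return (r + a - (t - a - b), c + b)
--         return (r, c + b - (t - 2 * a - b))
--
--     return [pos(t) for t in range(1 + a + b + a + d)]
-- ===== Notes on version B (the rewrite author's own statement) =====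
-- stated objective: alternative
-- what changed: Replaces A's stateful list construction (four append loops re-reading corners via edge[-1]) with a closed-form map from each perimeter index t to its coordinate: a pure piecewise function pos(t) applied over one range, with clamped segment lengths.
import Mathlib
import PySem

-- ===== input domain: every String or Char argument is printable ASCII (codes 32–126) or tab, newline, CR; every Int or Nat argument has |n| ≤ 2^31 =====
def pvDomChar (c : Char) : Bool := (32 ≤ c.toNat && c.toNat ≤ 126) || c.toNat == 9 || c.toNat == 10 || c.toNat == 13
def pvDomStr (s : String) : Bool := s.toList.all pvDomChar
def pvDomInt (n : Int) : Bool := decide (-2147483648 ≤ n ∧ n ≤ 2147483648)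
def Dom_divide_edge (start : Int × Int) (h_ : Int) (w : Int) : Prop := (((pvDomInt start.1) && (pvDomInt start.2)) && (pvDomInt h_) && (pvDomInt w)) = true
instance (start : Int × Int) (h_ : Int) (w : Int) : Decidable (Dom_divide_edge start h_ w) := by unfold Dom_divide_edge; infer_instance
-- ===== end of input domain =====

-- B replaces A's stateful construction (four append loops re-reading corners via
-- edge[-1]) with a closed-form map from each perimeter index to its coordinate
-- (objective: alternative).

-- ===== PORT A =====
def divide_edge (start : Int × Int) (h_ : Int) (w : Int) : List (Int × Int) :=
  let edge := (PySem.List.pyRange 1 h_ 1).foldl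
    (fun e i => e ++ [(start.1 + i, start.2)]) [start]
  -- edge[-1]: edge is always nonempty here, so the .getD default never fires
  let left_end := (PySem.List.pyGet? edge (-1)).getD (0, 0)
  let edge := (PySem.List.pyRange 1 w 1).foldl
    (fun e i => e ++ [(left_end.1, left_end.2 + i)]) edge
  let edge_end := (PySem.List.pyGet? edge (-1)).getD (0, 0)
  let edge := (PySem.List.pyRange 1 h_ 1).foldl
    (fun e i => e ++ [(edge_end.1 - i, edge_end.2)]) edge
  let right_end := (PySem.List.pyGet? edge (-1)).getD (0, 0)
  (PySem.List.pyRange 1 (w - 1) 1).foldl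
    (fun e i => e ++ [(right_end.1, right_end.2 - i)]) edge

-- ===== PORT B =====
-- the closed-form position function pos(t) of Source B
def posB (r c a b t : Int) : Int × Int :=
  if t ≤ a then (r + t, c)
  else if t ≤ a + b then (r + a, c + (t - a))
  else if t ≤ 2 * a + b then (r + a - (t - a - b), c + b)
  else (r, c + b - (t - 2 * a - b))

def divide_edge_alt (start : Int × Int) (h_ : Int) (w : Int) : List (Int × Int) :=
  let r := start.1
  let c := start.2
  let a := max (h_ - 1) 0
  let b := max (w - 1) 0
  let d := max (w - 2) 0
  (PySem.List.pyRange 0 (1 + a + b + a + d) 1).map (posB r c a b)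

-- ===== PRECONDITION & SPEC =====
def Spec_divide_edge (start : Int × Int) (h_ : Int) (w : Int) (out : List (Int × Int)) : Prop := out = divide_edge_alt start h_ w
instance (start : Int × Int) (h_ : Int) (w : Int) (out : List (Int × Int)) : Decidable (Spec_divide_edge start h_ w out) := by unfold Spec_divide_edge; infer_instance

-- ===== CLAIM (what is proved, stated in full; the proofs are below) =====
def Claim_equal_divide_edge : Prop := ∀ (start : Int × Int) (h_ : Int) (w : Int), Dom_divide_edge start h_ w → Spec_divide_edge start h_ w (divide_edge start h_ w)

-- ===== LEMMAS AND PROOFS =====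

-- canonical segment: the n points reached from c by repeatedly adding (d1, d2)
def segList (c : Int × Int) (d1 d2 : Int) : Nat → List (Int × Int)
  | 0 => []
  | n + 1 => (c.1 + d1, c.2 + d2) :: segList (c.1 + d1, c.2 + d2) d1 d2 n

-- the canonical perimeter: start, then the four segments
def canon (r c : Int) (aN bN dN : Nat) : List (Int × Int) :=
  (r, c) :: (segList (r, c) 1 0 aN ++
    (segList (r + aN, c) 0 1 bN ++
      (segList (r + aN, c + bN) (-1) 0 aN ++ segList (r, c + bN) 0 (-1) dN)))

theorem segList_concat (c : Int × Int) (d1 d2 : Int) (n : Nat) :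
    segList c d1 d2 (n + 1)
      = segList c d1 d2 n ++ [(c.1 + ((n : Int) + 1) * d1, c.2 + ((n : Int) + 1) * d2)] := by
  induction n generalizing c with
  | zero => simp [segList]
  | succ m ih =>
      rw [show m + 1 + 1 = (m + 1) + 1 from rfl, segList]
      rw [ih, segList]
      push_cast
      ring_nf
      simp

theorem segList_eq_map (c : Int × Int) (d1 d2 : Int) (n : Nat) :
    segList c d1 d2 n
      = (List.range n).map
          (fun (k : Nat) => (c.1 + ((k : Int) + 1) * d1, c.2 + ((k : Int) + 1) * d2)) := by
  induction n with
  | zero => simp [segList]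
  | succ m ih =>
      rw [segList_concat, ih, List.range_succ, List.map_append]
      simp

-- last element after appending a segment
theorem getLast?_seg (e : List (Int × Int)) (c : Int × Int) (d1 d2 : Int) (n : Nat)
    (h : e.getLast? = some c) :
    (e ++ segList c d1 d2 n).getLast?
      = some (c.1 + (n : Int) * d1, c.2 + (n : Int) * d2) := by
  cases n with
  | zero => simpa [segList] using h
  | succ m =>
      rw [segList_concat, ← List.append_assoc, List.getLast?_concat]
      push_cast
      ring_nf

theorem last_seg (e : List (Int × Int)) (c : Int × Int) (d1 d2 : Int) (n : Nat)
    (h : e.getLast? = some c) :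
    (PySem.List.pyGet? (e ++ segList c d1 d2 n) (-1)).getD (0, 0)
      = (c.1 + (n : Int) * d1, c.2 + (n : Int) * d2) := by
  rw [PySem.List.pyGet?_neg_one, getLast?_seg e c d1 d2 n h]
  rfl

-- A's per-edge loop: a pyRange(1,b) map of an affine point function is a segment
theorem pyMap_seg (b : Int) (c : Int × Int) (d1 d2 : Int) (f : Int → Int × Int)
    (hf : ∀ i, f i = (c.1 + i * d1, c.2 + i * d2)) :
    (PySem.List.pyRange 1 b 1).map f = segList c d1 d2 (b - 1).toNat := by
  rw [PySem.List.pyRange_one, List.map_map, segList_eq_map]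
  apply List.map_congr_left
  intro k _
  simp only [Function.comp_apply, hf, Prod.mk.injEq]
  constructor <;> ring

-- A equals the canonical perimeter
theorem divide_edge_canon (start : Int × Int) (h_ : Int) (w : Int) :
    divide_edge start h_ w
      = canon start.1 start.2 (h_ - 1).toNat (w - 1).toNat (w - 2).toNat := by
  unfold divide_edge canon
  simp only [PySem.List.foldl_append_singleton_eq_map]
  rw [pyMap_seg h_ start 1 0 (fun i => (start.1 + i, start.2)) (fun i => by simp)]
  rw [last_seg [start] start 1 0 (h_ - 1).toNat (by simp)]
  simp only [mul_one, mul_zero, add_zero]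
  rw [pyMap_seg w (start.1 + ((h_ - 1).toNat : Int), start.2) 0 1
        (fun i => (start.1 + ((h_ - 1).toNat : Int), start.2 + i)) (fun i => by simp)]
  rw [last_seg _ (start.1 + ((h_ - 1).toNat : Int), start.2) 0 1 (w - 1).toNat
        (by rw [getLast?_seg [start] start 1 0 (h_ - 1).toNat (by simp)]; norm_num)]
  simp only [mul_one, mul_zero, add_zero]
  rw [pyMap_seg h_ (start.1 + ((h_ - 1).toNat : Int), start.2 + ((w - 1).toNat : Int)) (-1) 0
        (fun i => (start.1 + ((h_ - 1).toNat : Int) - i, start.2 + ((w - 1).toNat : Int)))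
        (fun i => by simp only [Prod.mk.injEq]; constructor <;> ring)]
  rw [last_seg _ (start.1 + ((h_ - 1).toNat : Int), start.2 + ((w - 1).toNat : Int)) (-1) 0 (h_ - 1).toNat
        (by rw [getLast?_seg _ (start.1 + ((h_ - 1).toNat : Int), start.2) 0 1 (w - 1).toNat
                  (by rw [getLast?_seg [start] start 1 0 (h_ - 1).toNat (by simp)]; norm_num)]
            norm_num)]
  simp only [mul_neg_one, mul_zero, add_zero]
  rw [pyMap_seg (w - 1) (start.1 + ((h_ - 1).toNat : Int) + -((h_ - 1).toNat : Int), start.2 + ((w - 1).toNat : Int)) 0 (-1)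
        (fun i => (start.1 + ((h_ - 1).toNat : Int) + -((h_ - 1).toNat : Int), start.2 + ((w - 1).toNat : Int) - i))
        (fun i => by simp only [Prod.mk.injEq]; constructor <;> ring)]
  rw [show (w - 1 - 1 : Int) = w - 2 from by ring]
  simp only [show start.1 + ((h_ - 1).toNat : Int) + -((h_ - 1).toNat : Int) = start.1 from by ring]
  simp [List.append_assoc]

theorem pvConsCongr {α : Type} {x y : α} {a b : List α} (h1 : x = y) (h2 : a = b) :
    x :: a = y :: b := by rw [h1, h2]

theorem pvAppCongr {α : Type} {a b c d : List α} (h1 : a = c) (h2 : b = d) :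
    a ++ b = c ++ d := by rw [h1, h2]

-- B equals the canonical perimeter (generic over the clamped nat lengths)
theorem alt_gen (r c : Int) (aN bN dN : Nat) :
    (PySem.List.pyRange 0 (1 + (aN : Int) + bN + aN + dN) 1).map
        (posB r c aN bN)
      = canon r c aN bN dN := by
  have hL : (1 + (aN : Int) + bN + aN + dN - 0).toNat = 1 + aN + bN + aN + dN := by
    omega
  rw [PySem.List.pyRange_one, hL, List.map_map]
  rw [show 1 + aN + bN + aN + dN = ((1 + aN) + bN + aN) + dN from rfl]
  rw [List.range_add, List.range_add, List.range_add, List.range_add, List.range_one]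
  unfold canon
  simp only [List.map_append, List.map_map, List.map_cons,
    List.append_assoc, List.singleton_append, segList_eq_map]
  refine pvConsCongr (by simp [posB]) (pvAppCongr ?_ (pvAppCongr ?_ (pvAppCongr ?_ ?_)))
  · apply List.map_congr_left
    intro k hk
    rw [List.mem_range] at hk
    simp only [Function.comp_apply, posB]
    split_ifs <;> simp only [Prod.mk.injEq] <;> constructor <;> omega
  · apply List.map_congr_left
    intro k hk
    rw [List.mem_range] at hk
    simp only [Function.comp_apply, posB]
    split_ifs <;> simp only [Prod.mk.injEq] <;> constructor <;> omega
  · apply List.map_congr_left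
    intro k hk
    rw [List.mem_range] at hk
    simp only [Function.comp_apply, posB]
    split_ifs <;> simp only [Prod.mk.injEq] <;> constructor <;> omega
  · apply List.map_congr_left
    intro k hk
    rw [List.mem_range] at hk
    simp only [Function.comp_apply, posB]
    split_ifs <;> simp only [Prod.mk.injEq] <;> constructor <;> omega

theorem divide_edge_alt_canon (start : Int × Int) (h_ : Int) (w : Int) :
    divide_edge_alt start h_ w
      = canon start.1 start.2 (h_ - 1).toNat (w - 1).toNat (w - 2).toNat := by
  unfold divide_edge_alt
  have ha : max (h_ - 1) 0 = (((h_ - 1).toNat : Nat) : Int) := by omega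
  have hb : max (w - 1) 0 = (((w - 1).toNat : Nat) : Int) := by omega
  have hd : max (w - 2) 0 = (((w - 2).toNat : Nat) : Int) := by omega
  simp only [ha, hb, hd]
  exact alt_gen start.1 start.2 (h_ - 1).toNat (w - 1).toNat (w - 2).toNat

-- ===== VERDICT (by name: the statement is the Claim_ definition above) =====
theorem divide_edge_spec : Claim_equal_divide_edge := by
  intro start h_ w _
  unfold Spec_divide_edge
  rw [divide_edge_canon, divide_edge_alt_canon]
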